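-- pv_equiv track=rewrite | github.com/ML-flash/Night_Watcher | event_aggregator.py | _events_connected
-- ===== SOURCE A (Python) =====
-- from typing import Dict, List, Any, Set, Tuple
--
-- def _events_connected(event1: Dict[str, Any], event2: Dict[str, Any],
--                      actors: Dict[str, List], narratives: Dict[str, List]) -> bool:
--     """Check if two events share actors or narratives."""
--     # Get article IDs for both events
--     ids1 = set(event1.get("article_ids", []))
--     ids2 = set(event2.get("article_ids", []))
--
--     # Check actors
--     for actor, occurrences in actors.items():
--         actor_articles = {occ["article_id"] for occ in occurrences}
--         if ids1 & actor_articles and ids2 & actor_articles: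
--             return True
--
--     # Check narratives
--     for narrative, occurrences in narratives.items():
--         narrative_articles = {occ["article_id"] for occ in occurrences}
--         if ids1 & narrative_articles and ids2 & narrative_articles:
--             return True
--
--     return False
-- ===== SOURCE B (Python) =====
-- def _events_connected(event1, event2, actors, narratives):
--     """Check if two events share actors or narratives."""
--     ids1 = set(event1.get("article_ids", []))
--     ids2 = set(event2.get("article_ids", []))
--     # One flattening pass: every occurrence becomes an (article_id, tagged group) edge.
--     pairs = [(occ["article_id"], (kind, name))
--              for kind, groups in (("actor", actors), ("narr", narratives))
--              for name, occurrences in groups.items()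
--              for occ in occurrences]
--     groups1 = {tag for aid, tag in pairs if aid in ids1}
--     groups2 = {tag for aid, tag in pairs if aid in ids2}
--     return not groups1.isdisjoint(groups2)
-- ===== Notes on version B (the rewrite author's own statement) =====
-- stated objective: alternative
-- what changed: Instead of scanning actors then narratives, building a per-group article set and early-returning on the first group whose articles intersect both events, B makes one flattening pass turning every occurrence into an (article_id, tagged-group) edge, filters the edges by each event's article-id set into two tag sets, and returns whether those tag sets are not disjoint.
import Mathlib
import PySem

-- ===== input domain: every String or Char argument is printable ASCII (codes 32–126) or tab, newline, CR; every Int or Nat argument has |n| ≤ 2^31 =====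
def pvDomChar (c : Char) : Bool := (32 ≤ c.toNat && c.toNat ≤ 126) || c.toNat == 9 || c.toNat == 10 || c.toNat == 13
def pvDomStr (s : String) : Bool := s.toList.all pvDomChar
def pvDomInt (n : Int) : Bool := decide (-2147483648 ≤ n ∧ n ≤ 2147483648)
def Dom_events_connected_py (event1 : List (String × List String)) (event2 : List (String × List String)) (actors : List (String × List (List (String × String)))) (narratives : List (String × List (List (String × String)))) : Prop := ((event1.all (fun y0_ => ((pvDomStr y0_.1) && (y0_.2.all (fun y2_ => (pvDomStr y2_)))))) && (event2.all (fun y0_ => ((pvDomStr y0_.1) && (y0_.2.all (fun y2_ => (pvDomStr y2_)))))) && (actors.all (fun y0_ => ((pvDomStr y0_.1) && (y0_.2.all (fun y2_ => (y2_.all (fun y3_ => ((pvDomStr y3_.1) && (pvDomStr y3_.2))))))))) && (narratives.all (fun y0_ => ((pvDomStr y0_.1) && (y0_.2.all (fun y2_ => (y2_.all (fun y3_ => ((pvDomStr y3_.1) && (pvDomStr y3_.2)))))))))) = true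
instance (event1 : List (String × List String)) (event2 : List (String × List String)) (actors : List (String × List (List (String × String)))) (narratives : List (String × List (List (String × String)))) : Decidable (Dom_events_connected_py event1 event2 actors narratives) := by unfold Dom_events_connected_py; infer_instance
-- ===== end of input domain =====

-- B replaces A's two early-exit group scans with one flattening pass into (article_id, tagged-group) edges and a tag-set disjointness test (alternative decomposition, same cost).


-- ===== PORT A =====
-- occ["article_id"]: total lookup with a dummy default; equals the Python lookup whenever the key is present (ensured by Pre_)
def pvArtOf (occ : List (String × String)) : String :=
  (PySem.Dict.ofList occ).getD "article_id" ""

def pvGroupHit (ids1 ids2 : PySem.Set String) (occs : List (List (String × String))) : Bool :=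
  let arts : PySem.Set String := PySem.Set.ofList (occs.map pvArtOf)
  !(PySem.Set.inter ids1 arts).isEmpty && !(PySem.Set.inter ids2 arts).isEmpty

def events_connected_py (event1 : List (String × List String)) (event2 : List (String × List String)) (actors : List (String × List (List (String × String)))) (narratives : List (String × List (List (String × String)))) : Bool :=
  let ids1 : PySem.Set String := PySem.Set.ofList ((PySem.Dict.ofList event1).getD "article_ids" [])
  let ids2 : PySem.Set String := PySem.Set.ofList ((PySem.Dict.ofList event2).getD "article_ids" [])
  if (PySem.Dict.ofList actors).items.any (fun p => pvGroupHit ids1 ids2 p.2) then true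
  else if (PySem.Dict.ofList narratives).items.any (fun p => pvGroupHit ids1 ids2 p.2) then true
  else false

-- ===== PORT B =====
def pvPairs (actors : List (String × List (List (String × String)))) (narratives : List (String × List (List (String × String)))) : List (String × (String × String)) :=
  [("actor", actors), ("narr", narratives)].flatMap (fun kg =>
    (PySem.Dict.ofList kg.2).items.flatMap (fun p =>
      p.2.map (fun occ => ((PySem.Dict.ofList occ).getD "article_id" "", (kg.1, p.1)))))

def events_connected_py_alt (event1 : List (String × List String)) (event2 : List (String × List String)) (actors : List (String × List (List (String × String)))) (narratives : List (String × List (List (String × String)))) : Bool :=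
  let ids1 : PySem.Set String := PySem.Set.ofList ((PySem.Dict.ofList event1).getD "article_ids" [])
  let ids2 : PySem.Set String := PySem.Set.ofList ((PySem.Dict.ofList event2).getD "article_ids" [])
  let pairs := pvPairs actors narratives
  let groups1 : PySem.Set (String × String) := PySem.Set.ofList ((pairs.filter (fun q => PySem.Set.contains ids1 q.1)).map (fun q => q.2))
  let groups2 : PySem.Set (String × String) := PySem.Set.ofList ((pairs.filter (fun q => PySem.Set.contains ids2 q.1)).map (fun q => q.2))
  !(PySem.Set.isdisjoint groups1 groups2)

-- ===== PRECONDITION & SPEC =====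
-- Pre_ excludes inputs with an occurrence dict lacking the key "article_id": there A raises
-- KeyError unless an earlier group already returned True, and B always raises KeyError.
def Pre_events_connected_py (event1 : List (String × List String)) (event2 : List (String × List String)) (actors : List (String × List (List (String × String)))) (narratives : List (String × List (List (String × String)))) : Prop :=
  (∀ p ∈ actors, ∀ occ ∈ p.2, "article_id" ∈ occ.map Prod.fst) ∧
  (∀ p ∈ narratives, ∀ occ ∈ p.2, "article_id" ∈ occ.map Prod.fst)
instance (event1 : List (String × List String)) (event2 : List (String × List String)) (actors : List (String × List (List (String × String)))) (narratives : List (String × List (List (String × String)))) : Decidable (Pre_events_connected_py event1 event2 actors narratives) := by unfold Pre_events_connected_py; infer_instance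
def pvWitness_events_connected_py : (List (String × List String)) × (List (String × List String)) × (List (String × List (List (String × String)))) × (List (String × List (List (String × String)))) :=
  ([("article_ids", ["x"])], [("article_ids", ["x", "y"])], [("a", [[("article_id", "x")]])], [("n", [[("article_id", "y")]])])
def Spec_events_connected_py (event1 : List (String × List String)) (event2 : List (String × List String)) (actors : List (String × List (List (String × String)))) (narratives : List (String × List (List (String × String)))) (out : Bool) : Prop := out = events_connected_py_alt event1 event2 actors narratives
instance (event1 : List (String × List String)) (event2 : List (String × List String)) (actors : List (String × List (List (String × String)))) (narratives : List (String × List (List (String × String)))) (out : Bool) : Decidable (Spec_events_connected_py event1 event2 actors narratives out) := by unfold Spec_events_connected_py; infer_instance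

-- ===== CLAIM (what is proved, stated in full; the proofs are below) =====
def Claim_equal_events_connected_py : Prop := ∀ (event1 : List (String × List String)) (event2 : List (String × List String)) (actors : List (String × List (List (String × String)))) (narratives : List (String × List (List (String × String)))), Dom_events_connected_py event1 event2 actors narratives → Pre_events_connected_py event1 event2 actors narratives → Spec_events_connected_py event1 event2 actors narratives (events_connected_py event1 event2 actors narratives)

-- ===== LEMMAS AND PROOFS =====

theorem pvGroupHit_iff (ids1 ids2 : PySem.Set String) (occs : List (List (String × String))) :
    pvGroupHit ids1 ids2 occs = true ↔
      (∃ occ ∈ occs, pvArtOf occ ∈ ids1) ∧ (∃ occ ∈ occs, pvArtOf occ ∈ ids2) := by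
  unfold pvGroupHit
  simp only [Bool.and_eq_true, Bool.not_eq_true', List.isEmpty_eq_false_iff_exists_mem,
    PySem.Set.mem_inter, PySem.Set.mem_ofList, List.mem_map]
  constructor
  · rintro ⟨⟨x, hx1, occ, hocc, rfl⟩, ⟨y, hy1, occ', hocc', rfl⟩⟩
    exact ⟨⟨occ, hocc, hx1⟩, ⟨occ', hocc', hy1⟩⟩
  · rintro ⟨⟨occ, hocc, h1⟩, ⟨occ', hocc', h2⟩⟩
    exact ⟨⟨pvArtOf occ, h1, occ, hocc, rfl⟩, ⟨pvArtOf occ', h2, occ', hocc', rfl⟩⟩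

theorem mem_pvPairs (actors narratives : List (String × List (List (String × String))))
    (q : String × (String × String)) : q ∈ pvPairs actors narratives ↔
      (∃ p ∈ (PySem.Dict.ofList actors).items, ∃ occ ∈ p.2, q = (pvArtOf occ, ("actor", p.1))) ∨
      (∃ p ∈ (PySem.Dict.ofList narratives).items, ∃ occ ∈ p.2, q = (pvArtOf occ, ("narr", p.1))) := by
  unfold pvPairs
  simp [pvArtOf, List.mem_flatMap, List.mem_map, eq_comm]

theorem pv_items_value_unique {β : Type} (d : List (String × β)) {k : String} {v v' : β}
    (h : (k, v) ∈ (PySem.Dict.ofList d).items) (h' : (k, v') ∈ (PySem.Dict.ofList d).items) :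
    v = v' := by
  have e1 := PySem.Dict.get?_of_mem_items _ h (PySem.Dict.nodup_keys_ofList d)
  have e2 := PySem.Dict.get?_of_mem_items _ h' (PySem.Dict.nodup_keys_ofList d)
  rw [e1] at e2
  exact Option.some.inj e2

theorem pv_mem_groups (ids : PySem.Set String) (pairs : List (String × (String × String)))
    (t : String × String) :
    t ∈ PySem.Set.ofList ((pairs.filter (fun q => PySem.Set.contains ids q.1)).map (fun q => q.2)) ↔
      ∃ q ∈ pairs, q.1 ∈ ids ∧ q.2 = t := by
  simp [PySem.Set.mem_ofList, List.mem_map, List.mem_filter, and_assoc,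
    PySem.Set.contains_eq_listContains]

theorem pv_main (event1 event2 : List (String × List String))
    (actors narratives : List (String × List (List (String × String)))) :
    events_connected_py event1 event2 actors narratives
      = events_connected_py_alt event1 event2 actors narratives := by
  unfold events_connected_py events_connected_py_alt
  set ids1 := PySem.Set.ofList ((PySem.Dict.ofList event1).getD "article_ids" []) with hids1
  set ids2 := PySem.Set.ofList ((PySem.Dict.ofList event2).getD "article_ids" []) with hids2
  rw [Bool.eq_iff_iff]
  simp only [Bool.if_true_left, Bool.or_eq_true, List.any_eq_true, Bool.if_false_right,
    Bool.and_eq_true, decide_eq_true_eq, and_true, Bool.not_eq_true', ← Bool.not_eq_true,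
    PySem.Set.isdisjoint_iff]
  rw [not_forall]
  constructor
  · -- A = true → B = true
    rintro (⟨p, hp, hhit⟩ | ⟨p, hp, hhit⟩) <;>
      obtain ⟨⟨occ1, hocc1, h1⟩, ⟨occ2, hocc2, h2⟩⟩ := (pvGroupHit_iff ids1 ids2 p.2).mp hhit
    · refine ⟨("actor", p.1), ?_⟩
      rw [Classical.not_imp]
      refine ⟨(pv_mem_groups ids1 _ _).mpr ⟨(pvArtOf occ1, ("actor", p.1)), ?_, h1, rfl⟩, ?_⟩
      · exact (mem_pvPairs actors narratives _).mpr (Or.inl ⟨p, hp, occ1, hocc1, rfl⟩)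
      · simp only [not_not]
        exact (pv_mem_groups ids2 _ _).mpr ⟨(pvArtOf occ2, ("actor", p.1)),
          (mem_pvPairs actors narratives _).mpr (Or.inl ⟨p, hp, occ2, hocc2, rfl⟩), h2, rfl⟩
    · refine ⟨("narr", p.1), ?_⟩
      rw [Classical.not_imp]
      refine ⟨(pv_mem_groups ids1 _ _).mpr ⟨(pvArtOf occ1, ("narr", p.1)), ?_, h1, rfl⟩, ?_⟩
      · exact (mem_pvPairs actors narratives _).mpr (Or.inr ⟨p, hp, occ1, hocc1, rfl⟩)
      · simp only [not_not]
        exact (pv_mem_groups ids2 _ _).mpr ⟨(pvArtOf occ2, ("narr", p.1)),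
          (mem_pvPairs actors narratives _).mpr (Or.inr ⟨p, hp, occ2, hocc2, rfl⟩), h2, rfl⟩
  · -- B = true → A = true
    rintro ⟨t, ht⟩
    rw [Classical.not_imp, not_not] at ht
    obtain ⟨ht1, ht2⟩ := ht
    obtain ⟨q1, hq1p, hq1i, hq1t⟩ := (pv_mem_groups ids1 _ _).mp ht1
    obtain ⟨q2, hq2p, hq2i, hq2t⟩ := (pv_mem_groups ids2 _ _).mp ht2
    rcases (mem_pvPairs actors narratives _).mp hq1p with ⟨p, hp, occ1, hocc1, he1⟩ | ⟨p, hp, occ1, hocc1, he1⟩ <;>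
      rcases (mem_pvPairs actors narratives _).mp hq2p with ⟨p', hp', occ2, hocc2, he2⟩ | ⟨p', hp', occ2, hocc2, he2⟩ <;>
        subst he1 he2 <;> simp only at hq1t hq2t
    · -- both from actors
      left
      have hname : p.1 = p'.1 := congrArg Prod.snd (hq1t.trans hq2t.symm)
      have hval : p.2 = p'.2 := by
        rcases p with ⟨k, v⟩; rcases p' with ⟨k', v'⟩
        simp only at hname; subst hname
        exact pv_items_value_unique actors hp hp'
      exact ⟨p, hp, (pvGroupHit_iff ids1 ids2 p.2).mpr ⟨⟨occ1, hocc1, hq1i⟩, ⟨occ2, by rw [hval]; exact hocc2, hq2i⟩⟩⟩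
    · -- actor vs narr: the tags differ
      exfalso
      have := hq1t.trans hq2t.symm
      simp [Prod.ext_iff] at this
    · exfalso
      have := hq1t.trans hq2t.symm
      simp [Prod.ext_iff] at this
    · -- both from narratives
      right
      have hname : p.1 = p'.1 := congrArg Prod.snd (hq1t.trans hq2t.symm)
      have hval : p.2 = p'.2 := by
        rcases p with ⟨k, v⟩; rcases p' with ⟨k', v'⟩
        simp only at hname; subst hname
        exact pv_items_value_unique narratives hp hp'
      exact ⟨p, hp, (pvGroupHit_iff ids1 ids2 p.2).mpr ⟨⟨occ1, hocc1, hq1i⟩, ⟨occ2, by rw [hval]; exact hocc2, hq2i⟩⟩⟩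

-- ===== VERDICT (by name: the statement is the Claim_ definition above) =====
theorem events_connected_py_spec : Claim_equal_events_connected_py := by
  intro event1 event2 actors narratives _ _
  unfold Spec_events_connected_py
  exact pv_main event1 event2 actors narratives
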